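-- pv_equiv track=rewrite | github.com/hnjgg/SquirtlesAlgorithmStudy-Hard | 의진/프로그래머스/스타수열.py | solution
-- ===== SOURCE A (Python) =====
-- def get_max_length(seq):
--     if len(seq) == 1:
--         return 1
--     elif len(seq) == 2:
--         if seq[0] + 1 == seq[1]:
--             return 1
--         else:
--             return 2
--
--     result = 0
--
--     increasing_list = [seq[0]]
--     for s in seq[1:]:
--         if s-1 == increasing_list[-1]:
--             continue
--         else:
--             increasing_list.append(s)
--
--     result = len(increasing_list)
--
--     # increasing_list = [seq[1]]
--     # for s in seq[2:]:
--     #     if s-1 == increasing_list[-1]: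
--     #         continue
--     #     else:
--     #         increasing_list.append(s)
--     # result = max(result, len(increasing_list))
--
--     return result
--
-- def solution(a):
--     if len(a) == 1:
--         return 0
--
--     info_dict = {}
--
--     for i in range(len(a)-1):
--         if info_dict.get(a[i]) is None:
--             info_dict[a[i]] = [i]
--         else:
--             info_dict[a[i]].append(i)
--
--         if info_dict.get(a[i+1]) is None:
--             info_dict[a[i+1]] = [i]
--         else:
--             if info_dict[a[i+1]][-1] != i:
--                 info_dict[a[i+1]].append(i)
--             else:
--                 info_dict[a[i+1]].pop()
--
--     answer = 0
--     for k, v in info_dict.items():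
--         answer = max(answer, get_max_length(v))
--
--
--     return answer * 2
-- ===== SOURCE B (Python) =====
-- def solution(a):
--     n = len(a)
--     best = 0
--     for x in set(a):
--         i = 0
--         cnt = 0
--         while i < n - 1:
--             if a[i] != a[i + 1] and (a[i] == x or a[i + 1] == x):
--                 cnt += 1
--                 i += 2
--             else:
--                 i += 1
--         best = max(best, cnt)
--     return 2 * best
-- ===== Notes on version B (the rewrite author's own statement) =====
-- stated objective: idiomatic
-- what changed: Replaces A's per-value index-table dictionary (built with append/pop cancellation) plus run-collapse pass by the canonical greedy solution: for each distinct value x, one left-to-right scan counting leftmost disjoint adjacent pairs (i,i+1) with a[i]!=a[i+1] and x in the pair, returning twice the maximum.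
import Mathlib
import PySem

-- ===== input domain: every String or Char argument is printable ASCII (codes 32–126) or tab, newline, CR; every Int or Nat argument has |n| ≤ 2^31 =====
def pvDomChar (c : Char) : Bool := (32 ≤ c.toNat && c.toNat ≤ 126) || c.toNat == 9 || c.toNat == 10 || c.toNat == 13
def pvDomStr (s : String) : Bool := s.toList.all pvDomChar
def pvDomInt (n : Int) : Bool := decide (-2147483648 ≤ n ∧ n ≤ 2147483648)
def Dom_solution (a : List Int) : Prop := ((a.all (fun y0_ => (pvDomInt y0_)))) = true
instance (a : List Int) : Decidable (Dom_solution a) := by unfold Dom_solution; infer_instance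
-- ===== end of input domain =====

-- B replaces A's per-value index-table dictionary and run-collapse pass by the canonical
-- greedy star-sequence solution (one leftmost-disjoint-pair scan per distinct value); same
-- asymptotic size of code, B is the idiomatic textbook form.

-- ===== PORT A =====
def getMaxLength (seq : List Int) : Int :=
  if PySem.List.len seq = 1 then 1
  else if PySem.List.len seq = 2 then
    (if PySem.List.pyGetD seq 0 0 + 1 = PySem.List.pyGetD seq 1 0 then 1 else 2)
  else
    (((PySem.List.slice seq (some 1) none).foldl
      (fun acc s => if s - 1 = PySem.List.pyGetD acc (-1) 0 then acc else acc ++ [s])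
      [PySem.List.pyGetD seq 0 0]).length : Int)

def stepA (a : List Int) (d : PySem.Dict Int (List Int)) (i : Int) : PySem.Dict Int (List Int) :=
  let ai := PySem.List.pyGetD a i 0
  let ai1 := PySem.List.pyGetD a (i + 1) 0
  let d1 := if d.get? ai = none then d.insert ai [i]
            else d.insert ai ((d.get? ai).getD [] ++ [i])
  if d1.get? ai1 = none then d1.insert ai1 [i]
  else if PySem.List.pyGetD ((d1.get? ai1).getD []) (-1) 0 ≠ i then
    d1.insert ai1 ((d1.get? ai1).getD [] ++ [i])
  else d1.insert ai1 ((d1.get? ai1).getD []).dropLast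

def solution (a : List Int) : Int :=
  if PySem.List.len a = 1 then 0
  else
    let d := (PySem.List.pyRange 0 (PySem.List.len a - 1) 1).foldl (stepA a) PySem.Dict.empty
    (d.items.foldl (fun ans p => max ans (getMaxLength p.2)) 0) * 2

-- ===== PORT B =====
def greedyGo (a : List Int) (x : Int) (i cnt : Int) : Int :=
  if h : i < PySem.List.len a - 1 then
    if PySem.List.pyGetD a i 0 ≠ PySem.List.pyGetD a (i + 1) 0 ∧
       (PySem.List.pyGetD a i 0 = x ∨ PySem.List.pyGetD a (i + 1) 0 = x) then
      greedyGo a x (i + 2) (cnt + 1)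
    else
      greedyGo a x (i + 1) cnt
  else cnt
termination_by (PySem.List.len a - 1 - i).toNat
decreasing_by all_goals (simp only [PySem.List.len_eq] at *; omega)

def solution_alt (a : List Int) : Int :=
  2 * (PySem.Set.ofList a).foldl (fun best x => max best (greedyGo a x 0 0)) 0

-- ===== PRECONDITION & SPEC =====
-- Pre_ excludes exactly the arrays of length ≥ 2 whose elements are all equal: on those
-- every per-value index of A's dictionary cancels out and A raises IndexError.
def Pre_solution (a : List Int) : Prop := ¬ (2 ≤ a.length ∧ ∀ x ∈ a, x = a.headI)
instance (a : List Int) : Decidable (Pre_solution a) := by unfold Pre_solution; infer_instance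
def pvWitness_solution : List Int := [1, 2, 1]

def Spec_solution (a : List Int) (out : Int) : Prop := out = solution_alt a
instance (a : List Int) (out : Int) : Decidable (Spec_solution a out) := by unfold Spec_solution; infer_instance

-- ===== CLAIM (what is proved, stated in full; the proofs are below) =====
def Claim_equal_solution : Prop := ∀ (a : List Int), Dom_solution a → Pre_solution a → Spec_solution a (solution a)

-- ===== LEMMAS AND PROOFS =====

-- The pair condition at position i, as a Bool (used to characterise both programs).
def condB (a : List Int) (v : Int) (i : Int) : Bool :=
  decide (PySem.List.pyGetD a i 0 ≠ PySem.List.pyGetD a (i + 1) 0 ∧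
          (PySem.List.pyGetD a i 0 = v ∨ PySem.List.pyGetD a (i + 1) 0 = v))

-- Indices i ∈ [0, m) whose pair involves v (what A's dictionary stores for key v).
def idx (a : List Int) (v : Int) (m : Int) : List Int :=
  (PySem.List.pyRange 0 m 1).filter (condB a v)

-- Indices i ∈ [lo, len a - 1) whose pair involves v (B's remaining scan region).
def idxFrom (a : List Int) (v : Int) (lo : Int) : List Int :=
  (PySem.List.pyRange lo (PySem.List.len a - 1) 1).filter (condB a v)

-- run-collapse count: the length of A's `increasing_list`.
def ccFrom (last : Int) : List Int → Int
  | [] => 0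
  | s :: t => if s - 1 = last then ccFrom last t else 1 + ccFrom s t

def cc : List Int → Int
  | [] => 0
  | h :: t => 1 + ccFrom h t

-- A dictionary whose items are a key list tabulated by f.
def mkMapped (fo : List Int) (f : Int → List Int) : PySem.Dict Int (List Int) :=
  PySem.Dict.mk (fo.map (fun v => (v, f v)))

theorem get?_mkMapped (fo : List Int) (f : Int → List Int) (k : Int) :
    (mkMapped fo f).get? k = if k ∈ fo then some (f k) else none := by
  induction fo with
  | nil => simp [mkMapped, PySem.Dict.get?]
  | cons v fo ih =>
    simp only [mkMapped, List.map_cons, PySem.Dict.get?_mk_cons] at *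
    by_cases hv : v = k
    · subst hv; simp
    · simp [hv, ih, Ne.symm hv]

theorem contains_mkMapped (fo : List Int) (f : Int → List Int) (k : Int) :
    (mkMapped fo f).contains k = decide (k ∈ fo) := by
  rw [PySem.Dict.contains_eq_decide_mem_keys]
  simp [mkMapped, PySem.Dict.keys_mk]

theorem insert_mkMapped (fo : List Int) (f : Int → List Int) (k : Int) (w : List Int) :
    (mkMapped fo f).insert k w
      = mkMapped (PySem.Set.add fo k) (fun v => if v = k then w else f v) := by
  by_cases hk : k ∈ fo
  · apply PySem.Dict.ext
    rw [PySem.Dict.items_insert_of_contains _ _ (by simp [contains_mkMapped, hk])]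
    rw [PySem.Set.add_of_mem hk]
    simp only [mkMapped, List.map_map]
    refine List.map_congr_left (fun v _ => ?_)
    by_cases hv : v = k <;> simp [hv]
  · apply PySem.Dict.ext
    rw [PySem.Dict.items_insert_of_not_contains _ _ (by simp [contains_mkMapped, hk])]
    rw [PySem.Set.add_of_not_mem hk]
    simp only [mkMapped, List.map_append, List.map_cons, List.map_nil]
    congr 1
    refine List.map_congr_left (fun v hv => ?_)
    have : v ≠ k := fun h => hk (h ▸ hv)
    simp [this]

theorem mkMapped_congr (fo : List Int) (f g : Int → List Int)
    (h : ∀ v ∈ fo, f v = g v) : mkMapped fo f = mkMapped fo g := by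
  unfold mkMapped
  exact congrArg _ (List.map_congr_left (fun v hv => by rw [h v hv]))

-- ---------- basic facts about idx ----------

theorem mem_idx (a : List Int) (v m : Int) (i : Int) :
    i ∈ idx a v m ↔ (0 ≤ i ∧ i < m) ∧ condB a v i = true := by
  simp [idx, List.mem_filter, PySem.List.mem_pyRange_one]

theorem idx_succ (a : List Int) (v : Int) (m : Int) (hm : 0 ≤ m) :
    idx a v (m + 1) = idx a v m ++ (if condB a v m then [m] else []) := by
  unfold idx
  rw [PySem.List.pyRange_one_succ_right hm, List.filter_append]
  congr 1
  by_cases h : condB a v m <;> simp [h]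

theorem idx_of_not_mem_take (a : List Int) (v : Int) (m : Nat) (hm : m + 1 < a.length)
    (hv : v ∉ a.take (m + 1)) : idx a v (m : Int) = [] := by
  have hmem : ∀ j : Nat, j ≤ m → a.getD j 0 ∈ a.take (m + 1) := by
    intro j hj
    have hjl : j < a.length := by omega
    have hjt : j < (a.take (m + 1)).length := by
      simp [List.length_take]; omega
    have h1 : a.getD j 0 = (a.take (m + 1))[j] := by
      rw [List.getElem_take, List.getD_eq_getElem a 0 hjl]
    rw [h1]; exact List.getElem_mem hjt
  unfold idx
  rw [List.filter_eq_nil_iff]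
  intro i hi
  rw [PySem.List.mem_pyRange_one] at hi
  have h0 : (0:Int) ≤ i := hi.1
  have h1 : i < (m:Int) := hi.2
  have hil : i.toNat < a.length := by omega
  have hil1 : i.toNat + 1 < a.length := by omega
  have e1 : PySem.List.pyGetD a i 0 = a.getD i.toNat 0 := by
    rw [PySem.List.pyGetD_eq_getElem a 0 h0 (by omega), List.getD_eq_getElem a 0 hil]
  have e2 : PySem.List.pyGetD a (i+1) 0 = a.getD (i.toNat + 1) 0 := by
    rw [PySem.List.pyGetD_eq_getElem a 0 (show (0:Int) ≤ i + 1 by omega) (by omega),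
        List.getD_eq_getElem a 0 (by omega)]
    congr 1
    omega
  simp only [condB, decide_eq_true_eq]
  rintro ⟨hne, h | h⟩
  · exact hv (h ▸ (e1 ▸ hmem i.toNat (by omega)))
  · exact hv (h ▸ (e2 ▸ hmem (i.toNat + 1) (by omega)))

-- ---------- getMaxLength = cc on nonempty lists ----------

theorem foldl_inc_len (t : List Int) : ∀ (l : List Int) (last : Int),
    (((t.foldl (fun acc s => if s - 1 = PySem.List.pyGetD acc (-1) 0 then acc else acc ++ [s])
        (l ++ [last])).length : Int)) = (l.length : Int) + 1 + ccFrom last t := by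
  induction t with
  | nil => simp [ccFrom]
  | cons s t ih =>
    intro l last
    simp only [List.foldl_cons, PySem.List.pyGetD_neg_one_append_singleton]
    by_cases hs : s - 1 = last
    · rw [if_pos hs, ih l last]
      simp [ccFrom, hs]
    · rw [if_neg hs]
      have := ih (l ++ [last]) s
      rw [List.append_assoc] at this
      rw [← List.append_assoc] at this
      rw [this]
      simp only [ccFrom, if_neg hs, List.length_append, List.length_singleton]
      push_cast
      ring

theorem gml_eq_cc (seq : List Int) (h : seq ≠ []) : getMaxLength seq = cc seq := by
  match seq with
  | [] => exact absurd rfl h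
  | [x] => simp [getMaxLength, cc, ccFrom, PySem.List.len_eq]
  | [x, y] =>
    have h1 : PySem.List.pyGetD [x, y] 0 0 = x := PySem.List.pyGetD_zero_cons x [y] 0
    have h2 : PySem.List.pyGetD [x, y] 1 0 = y := by
      have : ((1:Nat):Int) = (1:Int) := rfl
      rw [← this, PySem.List.pyGetD_natCast]; rfl
    simp only [getMaxLength, PySem.List.len_eq, h1, h2, cc, ccFrom]
    norm_num
    split_ifs <;> omega
  | x :: y :: z :: t =>
    have hl : PySem.List.len (x :: y :: z :: t) = ((t.length : Int) + 3) := by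
      simp [PySem.List.len_eq]; ring
    rw [getMaxLength, hl]
    rw [if_neg (by omega), if_neg (by omega)]
    rw [PySem.List.slice_from_one]
    have h0 : PySem.List.pyGetD (x :: y :: z :: t) 0 0 = x :=
      PySem.List.pyGetD_zero_cons x (y :: z :: t) 0
    rw [h0]
    have := foldl_inc_len (y :: z :: t) [] x
    simp only [List.nil_append, List.length_nil] at this
    rw [List.tail_cons, this]
    simp [cc]

-- ---------- greedyGo = cc ∘ idxFrom ----------

theorem ccFrom_eq_cc (last : Int) (l : List Int) (h : ∀ s ∈ l, s ≠ last + 1) :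
    ccFrom last l = cc l := by
  cases l with
  | nil => rfl
  | cons s t =>
    have hs : ¬ (s - 1 = last) := by
      have := h s (List.mem_cons_self)
      omega
    simp [ccFrom, cc, hs]

theorem ccFrom_idxFrom (a : List Int) (x : Int) (i : Int) :
    ccFrom i (idxFrom a x (i + 1)) = cc (idxFrom a x (i + 2)) := by
  by_cases hi : i + 1 < PySem.List.len a - 1
  · unfold idxFrom
    rw [PySem.List.pyRange_one_cons hi]
    have hr : ∀ s ∈ (PySem.List.pyRange (i + 2) (PySem.List.len a - 1) 1).filter (condB a x),
        s ≠ i + 1 := by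
      intro s hs
      have := (PySem.List.mem_pyRange_one).1 (List.mem_filter.1 hs).1
      omega
    by_cases hc : condB a x (i + 1)
    · rw [List.filter_cons_of_pos hc]
      rw [show (i + 1 + 1 : Int) = i + 2 by ring]
      rw [show ccFrom i ((i+1) :: (PySem.List.pyRange (i + 2) (PySem.List.len a - 1) 1).filter (condB a x)) = ccFrom i ((PySem.List.pyRange (i + 2) (PySem.List.len a - 1) 1).filter (condB a x)) by simp [ccFrom]]
      exact ccFrom_eq_cc _ _ hr
    · rw [List.filter_cons_of_neg (by simpa using hc)]
      rw [show (i + 1 + 1 : Int) = i + 2 by ring]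
      exact ccFrom_eq_cc _ _ hr
  · have h1 : idxFrom a x (i + 1) = [] := by
      unfold idxFrom
      rw [PySem.List.pyRange_one_eq_nil (by omega)]
      rfl
    have h2 : idxFrom a x (i + 2) = [] := by
      unfold idxFrom
      rw [PySem.List.pyRange_one_eq_nil (by omega)]
      rfl
    rw [h1, h2]
    rfl

theorem greedy_eq_aux (a : List Int) (x : Int) (k : Nat) : ∀ (i cnt : Int), 0 ≤ i →
    (PySem.List.len a - 1 - i).toNat ≤ k →
    greedyGo a x i cnt = cnt + cc (idxFrom a x i) := by
  induction k with
  | zero =>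
    intro i cnt h0 hk
    have hlen := PySem.List.len_eq a
    have hni : PySem.List.len a - 1 ≤ i := by omega
    rw [greedyGo, dif_neg (by omega)]
    have : idxFrom a x i = [] := by
      unfold idxFrom
      rw [PySem.List.pyRange_one_eq_nil (by omega)]
      rfl
    rw [this]
    simp [cc]
  | succ k ih =>
    intro i cnt h0 hk
    have hlen := PySem.List.len_eq a
    by_cases hi : i < PySem.List.len a - 1
    · rw [greedyGo, dif_pos hi]
      have hcons : idxFrom a x i
          = List.filter (condB a x) (i :: PySem.List.pyRange (i + 1) (PySem.List.len a - 1) 1) := by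
        unfold idxFrom
        rw [PySem.List.pyRange_one_cons hi]
      by_cases hc : PySem.List.pyGetD a i 0 ≠ PySem.List.pyGetD a (i + 1) 0 ∧
          (PySem.List.pyGetD a i 0 = x ∨ PySem.List.pyGetD a (i + 1) 0 = x)
      · rw [if_pos hc, ih (i + 2) (cnt + 1) (by omega) (by omega)]
        have hcb : condB a x i = true := by simp [condB]; tauto
        rw [hcons, List.filter_cons_of_pos hcb]
        have hcf := ccFrom_idxFrom a x i
        unfold idxFrom at hcf ⊢
        rw [cc, hcf]
        ring
      · rw [if_neg hc, ih (i + 1) cnt (by omega) (by omega)]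
        have hcb : condB a x i = false := by simp [condB]; tauto
        rw [hcons, List.filter_cons_of_neg (by simp [hcb])]
        rfl
    · rw [greedyGo, dif_neg hi]
      have : idxFrom a x i = [] := by
        unfold idxFrom
        rw [PySem.List.pyRange_one_eq_nil (by omega)]
        rfl
      rw [this]
      simp [cc]

theorem greedy_eq (a : List Int) (x : Int) :
    greedyGo a x 0 0 = cc (idx a x (PySem.List.len a - 1)) := by
  rw [greedy_eq_aux a x (PySem.List.len a - 1).toNat 0 0 le_rfl (by omega)]
  unfold idxFrom idx
  ring

-- ---------- the dictionary invariant ----------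

theorem step_zero (a : List Int) (h2 : 2 ≤ a.length) :
    stepA a PySem.Dict.empty 0
      = mkMapped (PySem.Set.ofList (a.take 2)) (fun v => idx a v 1) := by
  have hempty : (PySem.Dict.empty : PySem.Dict Int (List Int))
      = mkMapped [] (fun v => idx a v 0) := rfl
  have e0 : PySem.List.pyGetD a 0 0 = a.getD 0 0 := PySem.List.pyGetD_zero a 0
  have e1 : PySem.List.pyGetD a (0 + 1) 0 = a.getD 1 0 := by
    rw [show ((0:Int) + 1) = ((1:Nat):Int) by norm_num, PySem.List.pyGetD_natCast]
  have htake : a.take 2 = [a.getD 0 0, a.getD 1 0] := by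
    match a, h2 with
    | x :: y :: t, _ => simp [List.take]
  have hofl : PySem.Set.ofList (a.take 2)
      = PySem.Set.add (PySem.Set.add [] (a.getD 0 0)) (a.getD 1 0) := by
    rw [htake]; rfl
  set am := a.getD 0 0 with ham
  set am1 := a.getD 1 0 with ham1
  simp only [stepA]
  rw [hempty, e0, e1]
  rw [get?_mkMapped]
  simp only [List.not_mem_nil, if_false, if_true]
  rw [insert_mkMapped]
  rw [get?_mkMapped]
  have haddnil : PySem.Set.add ([] : List Int) (am) = [am] := rfl
  rw [haddnil]
  by_cases heq : am1 ∈ [am]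
  · -- a[1] = a[0] : append 0 then pop it again
    rw [if_pos heq]
    simp only [List.mem_singleton] at heq
    simp only [heq, Option.getD_some, Option.some_ne_none, if_false]
    have hlast : PySem.List.pyGetD ([] ++ [(0:Int)]) (-1) 0 = 0 :=
      PySem.List.pyGetD_neg_one_append_singleton [] 0 0
    simp only [List.nil_append] at hlast
    rw [if_neg (by simp [hlast])]
    rw [insert_mkMapped, hofl, heq]
    apply mkMapped_congr
    intro v hv
    have hv' : v = am := by
      rcases (PySem.Set.mem_add _ _ _).1 hv with h | h
      · simpa using h
      · exact h
    subst hv'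
    have hc : condB a (am) 0 = false := by
      simp only [condB, decide_eq_false_iff_not]
      rintro ⟨hne, _⟩
      exact hne (by rw [e0, e1, heq])
    have hidx : idx a (am) 1 = [] := by
      unfold idx
      rw [show PySem.List.pyRange 0 1 1 = [0] by decide]
      rw [List.filter_cons_of_neg (by simp [hc]), List.filter_nil]
    simp [hidx]
  · -- a[1] ≠ a[0] : fresh key
    rw [if_neg heq]
    simp only [if_true]
    rw [insert_mkMapped, hofl]
    apply mkMapped_congr
    intro v hv
    simp only [List.mem_singleton] at heq
    have hv' : v = am ∨ v = am1 := by
      rcases (PySem.Set.mem_add _ _ _).1 hv with h | h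
      · exact Or.inl (by simpa using h)
      · exact Or.inr h
    have hc : condB a v 0 = true := by
      simp only [condB, decide_eq_true_eq]
      rw [e0, e1]
      refine ⟨fun h => heq (by tauto), ?_⟩
      tauto
    have hidx : idx a v 1 = [0] := by
      unfold idx
      rw [show PySem.List.pyRange 0 1 1 = [0] by decide]
      rw [List.filter_cons_of_pos hc, List.filter_nil]
    rcases hv' with h | h
    · rw [if_neg (h ▸ fun hh => heq hh.symm), if_pos h, hidx]
    · rw [if_pos h, hidx]

theorem step_succ (a : List Int) (m : Nat) (h1 : 1 ≤ m) (hm : m + 1 < a.length) :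
    stepA a (mkMapped (PySem.Set.ofList (a.take (m + 1))) (fun v => idx a v (m : Int))) (m : Int)
      = mkMapped (PySem.Set.ofList (a.take (m + 2))) (fun v => idx a v ((m : Int) + 1)) := by
  have e0 : PySem.List.pyGetD a (m : Int) 0 = a.getD m 0 := by
    rw [PySem.List.pyGetD_natCast]
  have e1 : PySem.List.pyGetD a ((m : Int) + 1) 0 = a.getD (m + 1) 0 := by
    rw [show ((m:Int) + 1) = (((m+1:Nat)):Int) by push_cast; ring, PySem.List.pyGetD_natCast]
  set am := a.getD m 0 with ham_def
  set am1 := a.getD (m + 1) 0 with ham1_def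
  have htake : a.take (m + 2) = a.take (m + 1) ++ [am1] := by
    rw [show m + 2 = (m + 1) + 1 by ring, List.take_add_one, List.getElem?_eq_getElem hm]
    rw [ham1_def, List.getD_eq_getElem a 0 hm]
    rfl
  have hofl : PySem.Set.ofList (a.take (m + 2))
      = PySem.Set.add (PySem.Set.ofList (a.take (m + 1))) am1 := by
    rw [htake, PySem.Set.ofList_append_singleton]
  have hamtake : am ∈ a.take (m + 1) := by
    have hml : m < a.length := by omega
    have hmt : m < (a.take (m + 1)).length := by simp [List.length_take]; omega
    have : am = (a.take (m + 1))[m] := by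
      rw [List.getElem_take, ham_def, List.getD_eq_getElem a 0 hml]
    rw [this]; exact List.getElem_mem hmt
  set fo := PySem.Set.ofList (a.take (m + 1)) with hfo
  have ham : am ∈ fo := by rw [hfo]; exact (PySem.Set.mem_ofList _ _).2 hamtake
  have hmnn : (0:Int) ≤ (m:Int) := by positivity
  have hidxsucc : ∀ v, idx a v ((m:Int) + 1)
      = idx a v (m:Int) ++ (if condB a v (m:Int) then [(m:Int)] else []) :=
    fun v => idx_succ a v (m:Int) hmnn
  have hcB : ∀ v, condB a v (m:Int) = decide (am ≠ am1 ∧ (am = v ∨ am1 = v)) := by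
    intro v
    simp only [condB, e0, e1]
  simp only [stepA]
  rw [e0, e1]
  rw [get?_mkMapped, if_pos ham]
  simp only [Option.some_ne_none, if_false, Option.getD_some]
  rw [insert_mkMapped, PySem.Set.add_of_mem ham]
  rw [get?_mkMapped]
  by_cases hold : am1 ∈ fo
  · rw [if_pos hold]
    simp only [Option.some_ne_none, if_false, Option.getD_some]
    by_cases heq : am1 = am
    · -- a[m] = a[m+1] : append m to the key's list, then pop it again
      rw [if_pos heq]
      rw [if_neg (by simp [PySem.List.pyGetD_neg_one_append_singleton])]
      rw [List.dropLast_concat]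
      rw [insert_mkMapped, PySem.Set.add_of_mem hold, hofl, PySem.Set.add_of_mem hold]
      apply mkMapped_congr
      intro v hv
      have hcf : condB a v (m:Int) = false := by
        rw [hcB v]
        simp only [decide_eq_false_iff_not]
        rintro ⟨hne, _⟩
        exact hne heq.symm
      rw [hidxsucc v, hcf]
      simp only [Bool.false_eq_true, if_false, List.append_nil]
      by_cases hv1 : v = am1
      · rw [if_pos hv1, hv1, heq]
      · rw [if_neg hv1, if_neg (fun h => hv1 (h.trans heq.symm))]
    · -- a[m] ≠ a[m+1], a[m+1] already a key : append m to its list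
      rw [if_neg heq]
      have hlastne : PySem.List.pyGetD (idx a am1 (m:Int)) (-1) 0 ≠ (m:Int) := by
        by_cases hnil : idx a am1 (m:Int) = []
        · rw [hnil]
          show ((0:Int)) ≠ (m:Int)
          omega
        · rw [PySem.List.pyGetD_neg_one _ _ hnil]
          have hmem := List.getLast_mem hnil
          have := (mem_idx a am1 (m:Int) _).1 hmem
          omega
      rw [if_pos hlastne]
      rw [insert_mkMapped, PySem.Set.add_of_mem hold, hofl, PySem.Set.add_of_mem hold]
      apply mkMapped_congr
      intro v hv
      rw [hidxsucc v]
      by_cases hv1 : v = am1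
      · have hct : condB a v (m:Int) = true := by
          rw [hcB v]
          simp only [decide_eq_true_eq]
          exact ⟨fun h => heq h.symm, Or.inr hv1.symm⟩
        rw [hct, if_pos hv1, hv1]
        simp
      · rw [if_neg hv1]
        by_cases hv0 : v = am
        · have hct : condB a v (m:Int) = true := by
            rw [hcB v]
            simp only [decide_eq_true_eq]
            exact ⟨fun h => heq h.symm, Or.inl hv0.symm⟩
          rw [hct, if_pos hv0, hv0]
          simp
        · have hcf : condB a v (m:Int) = false := by
            rw [hcB v]
            simp only [decide_eq_false_iff_not]
            rintro ⟨-, h | h⟩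
            · exact hv0 h.symm
            · exact hv1 h.symm
          rw [if_neg hv0, hcf]
          simp
  · -- a[m+1] is a fresh key
    rw [if_neg hold]
    simp only [if_true]
    rw [insert_mkMapped, PySem.Set.add_of_not_mem hold, hofl, PySem.Set.add_of_not_mem hold]
    have hne : am ≠ am1 := fun h => hold (h ▸ ham)
    have hnewtake : am1 ∉ a.take (m + 1) := fun h => hold ((PySem.Set.mem_ofList _ _).2 h)
    have hidxnil : idx a am1 (m:Int) = [] := idx_of_not_mem_take a am1 m hm hnewtake
    apply mkMapped_congr
    intro v hv
    rw [hidxsucc v]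
    by_cases hv1 : v = am1
    · have hct : condB a v (m:Int) = true := by
        rw [hcB v]
        simp only [decide_eq_true_eq]
        exact ⟨hne, Or.inr hv1.symm⟩
      rw [hct, if_pos hv1, hv1, hidxnil]
      simp
    · rw [if_neg hv1]
      by_cases hv0 : v = am
      · have hct : condB a v (m:Int) = true := by
          rw [hcB v]
          simp only [decide_eq_true_eq]
          exact ⟨hne, Or.inl hv0.symm⟩
        rw [hct, if_pos hv0, hv0]
        simp
      · have hcf : condB a v (m:Int) = false := by
          rw [hcB v]
          simp only [decide_eq_false_iff_not]
          rintro ⟨-, h | h⟩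
          · exact hv0 h.symm
          · exact hv1 h.symm
        rw [if_neg hv0, hcf]
        simp

theorem fold_inv (a : List Int) (m : Nat) (h1 : 1 ≤ m) (hm : m < a.length) :
    (PySem.List.pyRange 0 (m : Int) 1).foldl (stepA a) PySem.Dict.empty
      = mkMapped (PySem.Set.ofList (a.take (m + 1))) (fun v => idx a v (m : Int)) := by
  induction m with
  | zero => omega
  | succ k ih =>
    by_cases hk : k = 0
    · subst hk
      rw [show (((1:Nat)):Int) = 0 + 1 by norm_num, PySem.List.pyRange_one_succ_right le_rfl]
      rw [PySem.List.pyRange_one_eq_nil le_rfl]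
      simp only [List.nil_append, List.foldl_cons, List.foldl_nil]
      have := step_zero a (by omega)
      rw [this]
      norm_num
    · have hc : (((k + 1 : Nat)):Int) = ((k:Nat):Int) + 1 := by push_cast; ring
      rw [hc, PySem.List.pyRange_one_succ_right (by positivity), List.foldl_append]
      rw [ih (by omega) (by omega)]
      simp only [List.foldl_cons, List.foldl_nil]
      rw [step_succ a k (by omega) (by omega)]

-- ---------- nonemptiness of idx under Pre_ ----------

theorem seg_const (a : List Int) (l r : Nat) (hlr : l ≤ r)
    (h : ∀ j, l ≤ j → j < r → a.getD j 0 = a.getD (j + 1) 0) :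
    a.getD l 0 = a.getD r 0 := by
  induction r, hlr using Nat.le_induction with
  | base => rfl
  | succ r hr ih =>
    rw [ih (fun j hj hjr => h j hj (by omega)), h r hr (by omega)]

theorem exists_boundary (a : List Int) (h2 : 2 ≤ a.length)
    (h : ∃ x ∈ a, x ≠ a.headI) :
    ∃ j : Nat, j + 1 < a.length ∧ a.getD j 0 ≠ a.getD (j + 1) 0 := by
  by_contra hno
  push Not at hno
  obtain ⟨x, hx, hneq⟩ := h
  obtain ⟨t, ht, hxt⟩ := List.mem_iff_getElem.1 hx
  have hhead : a.headI = a.getD 0 0 := by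
    cases a with
    | nil => simp at h2
    | cons z zs => rfl
  have hconst : a.getD 0 0 = a.getD t 0 := by
    apply seg_const a 0 t (by omega)
    intro j hj hjt
    exact hno j (by omega)
  apply hneq
  rw [hhead, hconst, List.getD_eq_getElem a 0 ht, hxt]

theorem boundary_for_v (a : List Int) (v : Int) (hv : v ∈ a)
    (hb : ∃ j : Nat, j + 1 < a.length ∧ a.getD j 0 ≠ a.getD (j + 1) 0) :
    ∃ i : Nat, i + 1 < a.length ∧ a.getD i 0 ≠ a.getD (i + 1) 0 ∧
      (a.getD i 0 = v ∨ a.getD (i + 1) 0 = v) := by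
  obtain ⟨t, ht, htv⟩ : ∃ t, t < a.length ∧ a.getD t 0 = v := by
    obtain ⟨t, ht, h⟩ := List.mem_iff_getElem.1 hv
    exact ⟨t, ht, by rw [List.getD_eq_getElem a 0 ht, h]⟩
  by_cases hA : ∃ i, t ≤ i ∧ i + 1 < a.length ∧ a.getD i 0 ≠ a.getD (i + 1) 0
  · have hfind := Nat.find_spec hA
    set i0 := Nat.find hA with hi0
    refine ⟨i0, hfind.2.1, hfind.2.2, Or.inl ?_⟩
    rw [← htv]
    refine (seg_const a t i0 hfind.1 ?_).symm
    intro j hj hji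
    by_contra hne
    exact Nat.find_min hA hji ⟨hj, by omega, hne⟩
  · push Not at hA
    obtain ⟨j, hj1, hjne⟩ := hb
    have hjt : j < t := by
      by_contra h'
      exact hjne (hA j (by omega) hj1)
    have hQj : j + 1 < a.length ∧ a.getD j 0 ≠ a.getD (j + 1) 0 ∧ j < t := ⟨hj1, hjne, hjt⟩
    have hspec := Nat.findGreatest_spec (P := fun k => k + 1 < a.length ∧ a.getD k 0 ≠ a.getD (k + 1) 0 ∧ k < t) (by omega : j ≤ t - 1) hQj
    set j0 := Nat.findGreatest (fun k => k + 1 < a.length ∧ a.getD k 0 ≠ a.getD (k + 1) 0 ∧ k < t) (t - 1) with hj0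
    refine ⟨j0, hspec.1, hspec.2.1, Or.inr ?_⟩
    rw [← htv]
    refine seg_const a (j0 + 1) t (by omega) ?_
    intro k hk hkt
    by_contra hne
    have hQk : k + 1 < a.length ∧ a.getD k 0 ≠ a.getD (k + 1) 0 ∧ k < t := ⟨by omega, hne, hkt⟩
    exact Nat.findGreatest_is_greatest (P := fun k => k + 1 < a.length ∧ a.getD k 0 ≠ a.getD (k + 1) 0 ∧ k < t) (n := t - 1) (by omega) (by omega) hQk

theorem idx_ne_nil (a : List Int) (v : Int) (hv : v ∈ a) (h2 : 2 ≤ a.length)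
    (hpre : Pre_solution a) : idx a v (PySem.List.len a - 1) ≠ [] := by
  have hx : ∃ x ∈ a, x ≠ a.headI := by
    by_contra hno
    push Not at hno
    exact hpre ⟨h2, hno⟩
  obtain ⟨i, hi1, hne, hor⟩ := boundary_for_v a v hv (exists_boundary a h2 hx)
  have e0 : PySem.List.pyGetD a (i:Int) 0 = a.getD i 0 := by rw [PySem.List.pyGetD_natCast]
  have e1 : PySem.List.pyGetD a ((i:Int) + 1) 0 = a.getD (i + 1) 0 := by
    rw [show ((i:Int) + 1) = (((i+1:Nat)):Int) by push_cast; ring, PySem.List.pyGetD_natCast]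
  apply List.ne_nil_of_mem (a := (i:Int))
  rw [mem_idx]
  refine ⟨⟨by positivity, by simp [PySem.List.len_eq]; omega⟩, ?_⟩
  simp only [condB, decide_eq_true_eq, e0, e1]
  exact ⟨hne, hor⟩

-- the main case of the equivalence, for arrays of length ≥ 2
theorem equiv_main (a : List Int) (h2 : 2 ≤ a.length) (hpre : Pre_solution a) :
    solution a = solution_alt a := by
  have hne1 : ¬ (PySem.List.len a = 1) := by simp [PySem.List.len_eq]; omega
  have hcast : PySem.List.len a - 1 = ((a.length - 1 : Nat) : Int) := by
    simp [PySem.List.len_eq]; omega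
  rw [solution, if_neg hne1, hcast]
  rw [fold_inv a (a.length - 1) (by omega) (by omega)]
  have htk : a.take ((a.length - 1) + 1) = a := by
    rw [show a.length - 1 + 1 = a.length by omega, List.take_length]
  rw [htk]
  have hit : (mkMapped (PySem.Set.ofList a) (fun v => idx a v ((a.length - 1 : Nat):Int))).items
      = (PySem.Set.ofList a).map (fun v => (v, idx a v ((a.length - 1 : Nat):Int))) := rfl
  simp only [hit]
  rw [List.foldl_map, solution_alt]
  have hcong : ∀ (acc : Int), ∀ x ∈ PySem.Set.ofList a,
      max acc (getMaxLength (idx a x ((a.length - 1 : Nat):Int))) = max acc (greedyGo a x 0 0) := by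
    intro acc x hx
    have hxa : x ∈ a := (PySem.Set.mem_ofList _ _).1 hx
    have hnn : idx a x ((a.length - 1 : Nat):Int) ≠ [] := by
      rw [← hcast]
      exact idx_ne_nil a x hxa h2 hpre
    rw [gml_eq_cc _ hnn, greedy_eq, hcast]
  rw [PySem.List.foldl_congr_mem _ _ _ 0 hcong]
  ring

-- ===== VERDICT (by name: the statement is the Claim_ definition above) =====
theorem solution_spec : Claim_equal_solution := by
  intro a _ hpre
  unfold Spec_solution
  match a with
  | [] => decide
  | [x] =>
    have h1 : greedyGo [x] x 0 0 = 0 := by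
      rw [greedy_eq]
      have : idx [x] x (PySem.List.len [x] - 1) = [] := by
        unfold idx
        rw [PySem.List.pyRange_one_eq_nil (by simp [PySem.List.len_eq])]
        rfl
      rw [this]
      rfl
    have hofl : PySem.Set.ofList [x] = [x] := rfl
    rw [solution, solution_alt, if_pos (by simp [PySem.List.len_eq]), hofl]
    simp [h1]
  | x :: y :: t =>
    have h2 : 2 ≤ (x :: y :: t).length := by simp
    exact equiv_main (x :: y :: t) h2 hpre
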